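-- pv_equiv track=rewrite | github.com/shreya-bani/slide-review-agent | backend/analyzers/combine_analysis.py | _group_by_slide
-- ===== SOURCE A (Python) =====
-- from typing import Any, Dict, List, Optional
--
-- def _group_by_slide(issues: List[Dict]) -> Dict[int, List[Dict]]:
--     """Group all issues by slide/page index."""
--     by_slide = {}
--     for issue in issues:
--         slide_idx = issue.get("page_or_slide_index", -1)
--         if slide_idx not in by_slide:
--             by_slide[slide_idx] = []
--         by_slide[slide_idx].append(issue)
--
--     # Sort by slide index
--     return {k: by_slide[k] for k in sorted(by_slide.keys())}
-- ===== SOURCE B (Python) =====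
-- def _group_by_slide(issues):
--     """Group all issues by slide/page index: stable-sort by index, then cut the
--     sorted list into adjacent runs of equal index."""
--     def key(issue):
--         return issue.get("page_or_slide_index", -1)
--     ordered = sorted(issues, key=key)
--     result = {}
--     while ordered:
--         k = key(ordered[0])
--         group = [ordered[0]]
--         ordered = ordered[1:]
--         while ordered and key(ordered[0]) == k:
--             group.append(ordered[0])
--             ordered = ordered[1:]
--         result[k] = group
--     return result
-- ===== Notes on version B (the rewrite author's own statement) =====
-- stated objective: alternative
-- what changed: B stable-sorts the issue list by slide index and cuts it into adjacent equal-index runs, instead of A's hash-bucketing into a dict followed by sorting the keys and rebuilding.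
import Mathlib
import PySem

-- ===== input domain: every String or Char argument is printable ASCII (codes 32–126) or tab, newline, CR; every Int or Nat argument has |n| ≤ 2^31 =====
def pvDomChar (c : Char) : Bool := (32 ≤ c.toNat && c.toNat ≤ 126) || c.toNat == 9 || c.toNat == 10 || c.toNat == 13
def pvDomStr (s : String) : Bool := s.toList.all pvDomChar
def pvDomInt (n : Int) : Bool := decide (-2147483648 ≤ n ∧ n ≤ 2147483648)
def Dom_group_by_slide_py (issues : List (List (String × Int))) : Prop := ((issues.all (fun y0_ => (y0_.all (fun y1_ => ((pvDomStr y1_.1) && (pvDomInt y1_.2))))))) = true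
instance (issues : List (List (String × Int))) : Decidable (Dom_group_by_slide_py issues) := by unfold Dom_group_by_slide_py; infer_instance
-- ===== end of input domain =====

-- B replaces A's dict-bucketing + key sort by a stable sort of the issues followed by
-- cutting the sorted list into adjacent equal-index runs (alternative algorithm, same result).

-- ===== PORT A =====
-- issue.get("page_or_slide_index", -1): lookup in the issue's association list (first match)
def pvKeyOf (issue : List (String × Int)) : Int :=
  (PySem.Dict.mk issue).getD "page_or_slide_index" (-1)

def group_by_slide_py (issues : List (List (String × Int))) : List (Int × List (List (String × Int))) :=
  let by_slide := issues.foldl (fun d issue =>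
      let k := pvKeyOf issue
      let d := if !(d.contains k) then d.insert k ([] : List (List (String × Int))) else d
      d.modify k [] (· ++ [issue]))   -- by_slide[slide_idx].append(issue)
    PySem.Dict.empty
  -- {k: by_slide[k] for k in sorted(by_slide.keys())}; every such k is a key of by_slide,
  -- so by_slide[k] never raises and is exactly getD k []
  (PySem.List.sorted by_slide.keys (fun x => x) false).map (fun k => (k, by_slide.getD k []))

-- ===== PORT B =====
-- inner while loop of Source B: peel off the front the run of issues whose key equals k
def pvTakeRun (k : Int) : List (List (String × Int)) → List (List (String × Int)) × List (List (String × Int))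
  | [] => ([], [])
  | x :: xs =>
    if pvKeyOf x = k then
      let p := pvTakeRun k xs
      (x :: p.1, p.2)
    else ([], x :: xs)

lemma pvTakeRun_snd_length (k : Int) (xs : List (List (String × Int))) :
    (pvTakeRun k xs).2.length ≤ xs.length := by
  induction xs with
  | nil => simp [pvTakeRun]
  | cons x xs ih =>
    by_cases h : pvKeyOf x = k
    · simp [pvTakeRun, h]; omega
    · simp [pvTakeRun, h]

-- outer while loop of Source B, over the stably sorted issue list
def pvGroupRuns : List (List (String × Int)) → List (Int × List (List (String × Int)))
  | [] => []
  | x :: xs =>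
    let k := pvKeyOf x
    let p := pvTakeRun k xs
    (k, x :: p.1) :: pvGroupRuns p.2
termination_by l => l.length
decreasing_by
  have := pvTakeRun_snd_length (pvKeyOf x) xs
  simp; omega

def group_by_slide_py_alt (issues : List (List (String × Int))) : List (Int × List (List (String × Int))) :=
  pvGroupRuns (PySem.List.sorted issues pvKeyOf false)

-- ===== PRECONDITION & SPEC =====
def Spec_group_by_slide_py (issues : List (List (String × Int))) (out : List (Int × List (List (String × Int)))) : Prop := out = group_by_slide_py_alt issues
instance (issues : List (List (String × Int))) (out : List (Int × List (List (String × Int)))) : Decidable (Spec_group_by_slide_py issues out) := by unfold Spec_group_by_slide_py; infer_instance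

-- ===== CLAIM (what is proved, stated in full; the proofs are below) =====
def Claim_equal_group_by_slide_py : Prop := ∀ (issues : List (List (String × Int))), Dom_group_by_slide_py issues → Spec_group_by_slide_py issues (group_by_slide_py issues)

-- ===== LEMMAS AND PROOFS =====

-- Both ports equal this canonical form: sorted distinct keys, each paired with its issues in input order.
def pvCanon (issues : List (List (String × Int))) : List (Int × List (List (String × Int))) :=
  (PySem.List.sorted (PySem.Set.ofList (issues.map pvKeyOf)) (fun x => x) false).map
    (fun k => (k, issues.filter (fun i => pvKeyOf i == k)))

lemma pvStep_eq (d : PySem.Dict Int (List (List (String × Int)))) (k : Int) (x : List (String × Int)) :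
    ((if !(d.contains k) then d.insert k ([] : List (List (String × Int))) else d).modify k []
      (· ++ [x])) = d.modify k [] (· ++ [x]) := by
  by_cases h : d.contains k
  · simp [h]
  · simp only [h, Bool.not_false, if_pos]
    rw [PySem.Dict.modify, PySem.Dict.modify, PySem.Dict.getD_insert_self,
      PySem.Dict.insert_insert_self, PySem.Dict.getD_of_not_contains d _ (by simpa using h)]

lemma pvA_eq (issues : List (List (String × Int))) : group_by_slide_py issues = pvCanon issues := by
  unfold group_by_slide_py pvCanon
  simp only [pvStep_eq]
  have hfold : issues.foldl (fun d issue => d.modify (pvKeyOf issue) [] (· ++ [issue]))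
      PySem.Dict.empty =
      (issues.map (fun i => (pvKeyOf i, i))).foldl
        (fun d p => d.modify p.1 [] (· ++ [p.2])) PySem.Dict.empty := by
    rw [List.foldl_map]
  rw [hfold]
  have hkeys : ((issues.map (fun i => (pvKeyOf i, i))).foldl
      (fun d p => d.modify p.1 [] (· ++ [p.2])) PySem.Dict.empty).keys =
      PySem.Set.ofList (issues.map pvKeyOf) := by
    rw [List.foldl_map, PySem.Dict.keys_foldl_modify_key issues (fun i => pvKeyOf i) []
      (fun _ i => (· ++ [i])) PySem.Dict.empty]
    rw [PySem.Dict.keys_empty, PySem.Set.update_nil_left]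
  rw [hkeys]
  apply List.map_congr_left
  intro k _
  have hget := PySem.Dict.getD_foldl_modify_append (issues.map (fun i => (pvKeyOf i, i)))
    PySem.Dict.empty k
  rw [hget, PySem.Dict.getD_empty]
  simp [List.filter_map, Function.comp_def]

lemma pvInsertBy_pairwise (x : List (String × Int)) (acc : List (List (String × Int)))
    (h : acc.Pairwise (fun a b => pvKeyOf a ≤ pvKeyOf b)) :
    (PySem.List.insertBy (fun a b => decide (pvKeyOf a < pvKeyOf b)) x acc).Pairwise
      (fun a b => pvKeyOf a ≤ pvKeyOf b) := by
  induction acc with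
  | nil => simp [PySem.List.insertBy]
  | cons y ys ih =>
    rw [List.pairwise_cons] at h
    by_cases hb : pvKeyOf x < pvKeyOf y
    · rw [PySem.List.insertBy, if_pos (by simpa using hb)]
      refine List.Pairwise.cons ?_ (List.Pairwise.cons h.1 h.2)
      intro z hz
      rw [List.mem_cons] at hz
      rcases hz with rfl | hz
      · exact le_of_lt hb
      · exact le_of_lt (lt_of_lt_of_le hb (h.1 z hz))
    · rw [PySem.List.insertBy, if_neg (by simpa using hb)]
      refine List.Pairwise.cons ?_ (ih h.2)
      intro z hz
      rcases (PySem.List.mem_insertBy _ _ _ _).mp hz with rfl | hz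
      · exact le_of_not_gt hb
      · exact h.1 z hz

lemma pvInsertBy_filter (k : Int) (x : List (String × Int)) (acc : List (List (String × Int)))
    (h : acc.Pairwise (fun a b => pvKeyOf a ≤ pvKeyOf b)) :
    (PySem.List.insertBy (fun a b => decide (pvKeyOf a < pvKeyOf b)) x acc).filter
        (fun y => pvKeyOf y == k) =
      acc.filter (fun y => pvKeyOf y == k) ++ if pvKeyOf x == k then [x] else [] := by
  induction acc with
  | nil => simp [PySem.List.insertBy, List.filter_cons]
  | cons y ys ih =>
    rw [List.pairwise_cons] at h
    by_cases hb : pvKeyOf x < pvKeyOf y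
    · rw [PySem.List.insertBy, if_pos (by simpa using hb)]
      by_cases hx : pvKeyOf x == k
      · -- all of y::ys have key > k, so their filter is empty
        have hemp : (y :: ys).filter (fun z => pvKeyOf z == k) = [] := by
          rw [List.filter_eq_nil_iff]
          intro z hz
          have hk : pvKeyOf x = k := by simpa using hx
          have : pvKeyOf y ≤ pvKeyOf z := by
            rw [List.mem_cons] at hz
            rcases hz with rfl | hz
            · exact le_refl _
            · exact h.1 z hz
          simp only [beq_iff_eq]
          omega
        rw [List.filter_cons, hemp]
        simp [hx]
      · rw [List.filter_cons]
        simp [hx]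
    · rw [PySem.List.insertBy, if_neg (by simpa using hb)]
      rw [List.filter_cons, List.filter_cons, ih h.2]
      by_cases hy : pvKeyOf y == k <;> simp [hy]

lemma pvFoldl_insertBy_filter (k : Int) (xs acc : List (List (String × Int)))
    (h : acc.Pairwise (fun a b => pvKeyOf a ≤ pvKeyOf b)) :
    (xs.foldl (fun acc x => PySem.List.insertBy (fun a b => decide (pvKeyOf a < pvKeyOf b)) x acc) acc).filter
        (fun y => pvKeyOf y == k) =
      acc.filter (fun y => pvKeyOf y == k) ++ xs.filter (fun y => pvKeyOf y == k) := by
  induction xs generalizing acc with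
  | nil => simp
  | cons x xs ih =>
    rw [List.foldl_cons, ih _ (pvInsertBy_pairwise x acc h), pvInsertBy_filter k x acc h,
      List.filter_cons]
    by_cases hx : pvKeyOf x == k <;> simp [hx]

lemma pvSorted_filter (k : Int) (issues : List (List (String × Int))) :
    (PySem.List.sorted issues pvKeyOf false).filter (fun y => pvKeyOf y == k) =
      issues.filter (fun y => pvKeyOf y == k) := by
  rw [PySem.List.sorted_eq_foldl_insertBy, pvFoldl_insertBy_filter k issues [] (by simp)]
  simp

lemma pvTakeRun_eq (k : Int) (xs : List (List (String × Int))) :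
    pvTakeRun k xs = (xs.takeWhile (fun y => pvKeyOf y == k), xs.dropWhile (fun y => pvKeyOf y == k)) := by
  induction xs with
  | nil => simp [pvTakeRun]
  | cons x xs ih =>
    by_cases h : pvKeyOf x = k <;> simp [pvTakeRun, h, ih]

lemma pvOfList_sublist {α : Type} [BEq α] [LawfulBEq α] (ys : List α) :
    (PySem.Set.ofList ys).Sublist ys := by
  induction ys with
  | nil => simp [PySem.Set.ofList, PySem.Set.empty]
  | cons y t ih =>
    rw [PySem.Set.ofList_cons]
    exact List.Sublist.cons₂ y (List.Sublist.trans (List.filter_sublist) ih)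

lemma pvDiscard_of_not_mem {α : Type} [BEq α] [LawfulBEq α] (s : PySem.Set α) (x : α) (h : x ∉ s) :
    PySem.Set.discard s x = s := by
  rw [PySem.Set.discard, List.filter_eq_self.mpr]
  intro a ha
  simp [show a ≠ x from fun e => h (e ▸ ha)]

lemma pvDedup_all_head (k : Int) (ms ns : List Int) (hm : ∀ y ∈ ms, y = k) (hn : k ∉ ns) :
    PySem.List.dedup (k :: (ms ++ ns)) = k :: PySem.List.dedup ns := by
  induction ms with
  | nil =>
    simp only [PySem.List.dedup, List.nil_append, PySem.Set.ofList_cons]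
    rw [pvDiscard_of_not_mem _ _ (by simpa [PySem.Set.mem_ofList] using hn)]
  | cons m ms ih =>
    have hmk : m = k := hm m (by simp)
    subst hmk
    have h2 := ih (fun y hy => hm y (by simp [hy]))
    simp only [PySem.List.dedup, List.cons_append, PySem.Set.ofList_cons] at h2 ⊢
    have hX : (PySem.Set.ofList (ms ++ ns)).discard m = PySem.Set.ofList ns := List.cons_injective h2
    simp only [PySem.Set.discard] at hX ⊢
    rw [List.filter_cons_of_neg (by simp), List.filter_filter]
    simp only [Bool.and_self]
    rw [hX]

lemma pvGroupRuns_eq (l : List (List (String × Int)))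
    (h : l.Pairwise (fun a b => pvKeyOf a ≤ pvKeyOf b)) :
    pvGroupRuns l = (PySem.List.dedup (l.map pvKeyOf)).map
      (fun k => (k, l.filter (fun i => pvKeyOf i == k))) := by
  induction l using pvGroupRuns.induct with
  | case1 => simp [pvGroupRuns]
  | case2 x xs k p ih =>
    rw [pvGroupRuns]
    simp only [p, pvTakeRun_eq] at ih
    simp only [pvTakeRun_eq]
    have hpc := List.pairwise_cons.mp h
    have hgk : ∀ y ∈ xs.takeWhile (fun y => pvKeyOf y == k), pvKeyOf y = k := by
      intro y hy
      simpa using List.mem_takeWhile_imp hy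
    have hrsub := List.dropWhile_sublist (l := xs) (fun y => pvKeyOf y == k)
    have hrp := hpc.2.sublist hrsub
    have hr : ∀ y ∈ xs.dropWhile (fun y => pvKeyOf y == k), k < pvKeyOf y := by
      intro y hy
      cases hrd : xs.dropWhile (fun y => pvKeyOf y == k) with
      | nil => rw [hrd] at hy; simp at hy
      | cons r0 rr =>
        have h0 : (pvKeyOf r0 == k) = false := by
          have := List.head?_dropWhile_not (fun y => pvKeyOf y == k) xs
          rw [hrd] at this
          simpa using this
        have h0' : pvKeyOf r0 ≠ k := by simpa using h0
        have hr0 : k ≤ pvKeyOf r0 :=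
          hpc.1 r0 (hrsub.mem (by rw [hrd]; simp))
        rw [hrd] at hy
        rcases List.mem_cons.mp hy with rfl | hy'
        · omega
        · have h1 : pvKeyOf r0 ≤ pvKeyOf y := by
            rw [hrd] at hrp
            exact (List.pairwise_cons.mp hrp).1 y hy'
          omega
    have hmap : (x :: xs).map pvKeyOf =
        pvKeyOf x :: ((xs.takeWhile (fun y => pvKeyOf y == k)).map pvKeyOf ++
          (xs.dropWhile (fun y => pvKeyOf y == k)).map pvKeyOf) := by
      conv_lhs => rw [List.map_cons, ← List.takeWhile_append_dropWhile
        (p := fun y => pvKeyOf y == k) (l := xs)]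
      rw [List.map_append]
    have hxk : pvKeyOf x = k := rfl
    rw [hmap, hxk, pvDedup_all_head k _ _
      (by intro y hy; rcases List.mem_map.mp hy with ⟨z, hz, rfl⟩; exact hgk z hz)
      (by intro hk; rcases List.mem_map.mp hk with ⟨z, hz, he⟩; exact absurd he (ne_of_gt (hr z hz)))]
    rw [List.map_cons, ih hrp]
    congr 1
    · -- head: (k, x :: takeWhile) = (k, (x::xs).filter (== k))
      have hfx : (x :: xs).filter (fun i => pvKeyOf i == k) =
          x :: xs.takeWhile (fun y => pvKeyOf y == k) := by
        rw [List.filter_cons]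
        simp only [hxk, beq_self_eq_true, if_pos]
        congr 1
        conv_lhs => rw [← List.takeWhile_append_dropWhile (p := fun y => pvKeyOf y == k) (l := xs)]
        rw [List.filter_append, List.filter_eq_self.mpr (by intro a ha; simp [hgk a ha]),
          List.filter_eq_nil_iff.mpr (by intro a ha; simp [ne_of_gt (hr a ha)]), List.append_nil]
      rw [hfx]
    · apply List.map_congr_left
      intro k' hk'
      have hk'mem : k' ∈ (xs.dropWhile (fun y => pvKeyOf y == k)).map pvKeyOf := by
        rw [PySem.List.dedup_eq_ofList, PySem.Set.mem_ofList] at hk'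
        exact hk'
      have hkk' : k < k' := by
        rcases List.mem_map.mp hk'mem with ⟨z, hz, rfl⟩
        exact hr z hz
      congr 1
      symm
      rw [List.filter_cons]
      simp only [hxk, show (k == k') = false by simpa using (ne_of_lt hkk'), if_neg,
        Bool.false_eq_true, not_false_iff]
      conv_lhs => rw [← List.takeWhile_append_dropWhile (p := fun y => pvKeyOf y == k) (l := xs)]
      rw [List.filter_append, List.filter_eq_nil_iff.mpr
        (by intro a ha; simp [hgk a ha, ne_of_lt hkk']), List.nil_append]

lemma pvB_eq (issues : List (List (String × Int))) : group_by_slide_py_alt issues = pvCanon issues := by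
  rw [group_by_slide_py_alt, pvGroupRuns_eq _ (PySem.List.sorted_pairwise issues pvKeyOf),
    pvCanon]
  have hnd : (PySem.List.dedup ((PySem.List.sorted issues pvKeyOf false).map pvKeyOf)).Nodup := by
    rw [PySem.List.dedup_eq_ofList]; exact PySem.Set.nodup_ofList _
  have hperm : (PySem.List.dedup ((PySem.List.sorted issues pvKeyOf false).map pvKeyOf)).Perm
      (PySem.Set.ofList (issues.map pvKeyOf)) := by
    refine (List.perm_ext_iff_of_nodup hnd (PySem.Set.nodup_ofList _)).mpr ?_
    intro a
    rw [PySem.List.dedup_eq_ofList, PySem.Set.mem_ofList, PySem.Set.mem_ofList]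
    exact ((PySem.List.sorted_perm issues pvKeyOf false).map pvKeyOf).mem_iff
  have hpw : (PySem.List.dedup ((PySem.List.sorted issues pvKeyOf false).map pvKeyOf)).Pairwise
      (· < ·) := by
    have h1 := PySem.List.sorted_map_key_pairwise issues pvKeyOf
    have h2 : (PySem.List.dedup ((PySem.List.sorted issues pvKeyOf false).map pvKeyOf)).Pairwise
        (· ≤ ·) := by
      rw [PySem.List.dedup_eq_ofList]
      exact h1.sublist (pvOfList_sublist _)
    exact (h2.and hnd).imp (fun h => lt_of_le_of_ne h.1 h.2)
  rw [PySem.List.sorted_eq_of_perm_of_pairwise_lt _ _ _ hperm hpw]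
  apply List.map_congr_left
  intro k _
  rw [pvSorted_filter]

-- ===== VERDICT (by name: the statement is the Claim_ definition above) =====
theorem group_by_slide_py_spec : Claim_equal_group_by_slide_py := by
  intro issues _
  unfold Spec_group_by_slide_py
  rw [pvA_eq, pvB_eq]
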